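-- pv_equiv track=rewrite | github.com/victorcotofana/invatare_nesupervizata_public | module_evaluation.py | rearange_clustering_data
-- ===== SOURCE A (Python) =====
-- def rearange_clustering_data(predictions_clusterized, no_clusters, ground_truths):
--     # should be len(prediction_clusterized) == len(ground_truths), obv; that is the number of test frames
--     if len(predictions_clusterized) != len(ground_truths):
--         # again, really really hope this will never run
--         raise Exception('get_tests_ground_truths() gave wrong output. len(predictions) != len(ground_truths)')
--
--     # prepare the clustering data for computation of the entropy
--     # matrix, row index is the cluster index; the row is the associated labels array with that cluster
--     clusters_ground_truths = []
--     for no_cluster in range(no_clusters):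
--         cluster_labels = []
--         clustered_frames_indices = [index for index, value in enumerate(predictions_clusterized) if value == no_cluster]
--
--         for index in clustered_frames_indices:
--             cluster_labels.append(ground_truths[index])
--
--         clusters_ground_truths.append(cluster_labels)
--
--     return clusters_ground_truths
-- ===== SOURCE B (Python) =====
-- def rearange_clustering_data(predictions_clusterized, no_clusters, ground_truths):
--     if len(predictions_clusterized) != len(ground_truths):
--         raise Exception('get_tests_ground_truths() gave wrong output. len(predictions) != len(ground_truths)')
--     # single pass: drop each ground truth into the bucket of its predicted cluster
--     buckets = [[] for _ in range(no_clusters)]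
--     for p, g in zip(predictions_clusterized, ground_truths):
--         if 0 <= p < no_clusters:
--             buckets[p].append(g)
--     return buckets
-- ===== Notes on version B (the rewrite author's own statement) =====
-- stated objective: faster
-- what changed: Replaced the per-cluster rescans of the predictions list with a single pass that appends each ground truth to the bucket indexed by its predicted cluster.
import Mathlib
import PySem

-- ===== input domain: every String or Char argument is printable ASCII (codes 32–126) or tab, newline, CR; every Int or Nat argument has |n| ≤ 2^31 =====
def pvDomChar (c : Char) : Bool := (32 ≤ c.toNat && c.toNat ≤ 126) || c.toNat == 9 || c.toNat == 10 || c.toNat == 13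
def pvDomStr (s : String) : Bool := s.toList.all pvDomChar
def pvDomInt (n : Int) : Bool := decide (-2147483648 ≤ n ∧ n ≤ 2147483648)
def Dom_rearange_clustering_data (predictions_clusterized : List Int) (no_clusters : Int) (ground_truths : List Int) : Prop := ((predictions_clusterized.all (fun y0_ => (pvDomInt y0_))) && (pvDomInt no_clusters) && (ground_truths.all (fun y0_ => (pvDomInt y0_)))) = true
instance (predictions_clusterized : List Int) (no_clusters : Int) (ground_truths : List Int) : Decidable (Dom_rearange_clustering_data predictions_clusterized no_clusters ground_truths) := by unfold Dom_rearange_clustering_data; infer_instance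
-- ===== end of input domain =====

-- B replaces A's per-cluster rescans with one pass that buckets each label by its predicted cluster (asymptotically fewer scans).


-- ===== PORT A =====
-- literal transliteration of A; 'ground_truths[index]' via pyGetD (index is always in range under Pre_: it indexes ground_truths, whose length equals predictions_clusterized's)
def rearange_clustering_data (predictions_clusterized : List Int) (no_clusters : Int) (ground_truths : List Int) : List (List Int) :=
  (PySem.List.pyRange 0 no_clusters 1).foldl (fun clusters_ground_truths no_cluster =>
    let clustered_frames_indices :=
      ((PySem.List.enumerate predictions_clusterized).filter (fun iv => iv.2 == no_cluster)).map (fun iv => iv.1)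
    let cluster_labels :=
      clustered_frames_indices.foldl (fun ls index => ls ++ [PySem.List.pyGetD ground_truths index 0]) []
    clusters_ground_truths ++ [cluster_labels]) []

-- ===== PORT B =====
def rearange_clustering_data_alt (predictions_clusterized : List Int) (no_clusters : Int) (ground_truths : List Int) : List (List Int) :=
  (predictions_clusterized.zip ground_truths).foldl
    (fun buckets pg =>
      if 0 ≤ pg.1 ∧ pg.1 < no_clusters then buckets.modify pg.1.toNat (fun l => l ++ [pg.2]) else buckets)
    (List.replicate no_clusters.toNat [])

-- ===== PRECONDITION & SPEC =====
-- Pre_ excludes exactly the inputs where A raises its explicit Exception: mismatched lengths.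
def Pre_rearange_clustering_data (predictions_clusterized : List Int) (no_clusters : Int) (ground_truths : List Int) : Prop :=
  predictions_clusterized.length = ground_truths.length
instance (predictions_clusterized : List Int) (no_clusters : Int) (ground_truths : List Int) : Decidable (Pre_rearange_clustering_data predictions_clusterized no_clusters ground_truths) := by unfold Pre_rearange_clustering_data; infer_instance
def pvWitness_rearange_clustering_data : List Int × Int × List Int := ([0, 2, 1, 0], 3, [7, 8, 9, 7])
def Spec_rearange_clustering_data (predictions_clusterized : List Int) (no_clusters : Int) (ground_truths : List Int) (out : List (List Int)) : Prop := out = rearange_clustering_data_alt predictions_clusterized no_clusters ground_truths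
instance (predictions_clusterized : List Int) (no_clusters : Int) (ground_truths : List Int) (out : List (List Int)) : Decidable (Spec_rearange_clustering_data predictions_clusterized no_clusters ground_truths out) := by unfold Spec_rearange_clustering_data; infer_instance

-- ===== CLAIM (what is proved, stated in full; the proofs are below) =====
def Claim_equal_rearange_clustering_data : Prop := ∀ (predictions_clusterized : List Int) (no_clusters : Int) (ground_truths : List Int), Dom_rearange_clustering_data predictions_clusterized no_clusters ground_truths → Pre_rearange_clustering_data predictions_clusterized no_clusters ground_truths → Spec_rearange_clustering_data predictions_clusterized no_clusters ground_truths (rearange_clustering_data predictions_clusterized no_clusters ground_truths)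

-- ===== LEMMAS AND PROOFS =====

-- the labels that end up in bucket c, read off positionally from the zipped lists
def pvBucket (c : Int) (zs : List (Int × Int)) : List Int :=
  zs.filterMap (fun pg => if pg.1 = c then some pg.2 else none)

-- B's one-pass fold, characterised entry by entry
theorem pvB_getElem? (n : Int) (zs : List (Int × Int)) : ∀ (bs : List (List Int)) (c : Nat), (c : Int) < n →
    (zs.foldl (fun buckets pg =>
      if 0 ≤ pg.1 ∧ pg.1 < n then buckets.modify pg.1.toNat (fun l => l ++ [pg.2]) else buckets) bs)[c]?
    = bs[c]?.map (fun l => l ++ pvBucket (c : Int) zs) := by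
  induction zs with
  | nil =>
    intro bs c hc
    simp [pvBucket]
  | cons pg zs ih =>
    intro bs c hc
    simp only [List.foldl_cons]
    by_cases hg : 0 ≤ pg.1 ∧ pg.1 < n
    · simp only [if_pos hg]
      rw [ih _ c hc]
      by_cases he : pg.1 = (c : Int)
      · have ht : pg.1.toNat = c := by omega
        rw [List.getElem?_modify]
        simp [pvBucket, he]
        cases bs[c]? <;> simp
      · have ht : pg.1.toNat ≠ c := by omega
        rw [List.getElem?_modify]
        simp [pvBucket, he, ht]
    · simp only [if_neg hg]
      rw [ih _ c hc]
      have he : pg.1 ≠ (c : Int) := by omega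
      simp [pvBucket, he]

theorem pvB_length (n : Int) (zs : List (Int × Int)) : ∀ (bs : List (List Int)),
    (zs.foldl (fun buckets pg =>
      if 0 ≤ pg.1 ∧ pg.1 < n then buckets.modify pg.1.toNat (fun l => l ++ [pg.2]) else buckets) bs).length
    = bs.length := by
  induction zs with
  | nil => intro bs; rfl
  | cons pg zs ih =>
    intro bs
    simp only [List.foldl_cons]
    rw [ih]
    by_cases hg : 0 ≤ pg.1 ∧ pg.1 < n <;> simp [hg]

-- A's inner row, read off positionally from the zipped lists
theorem pvA_row (c : Int) : ∀ (preds gts G : List Int) (s : Nat),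
    G.drop s = gts → preds.length ≤ gts.length →
    ((PySem.List.enumerate preds (s : Int)).filter (fun iv => iv.2 == c)).map
        (fun iv => PySem.List.pyGetD G iv.1 0)
      = pvBucket c (preds.zip gts) := by
  intro preds
  induction preds with
  | nil => intro gts G s _ _; simp [PySem.List.enumerate, pvBucket]
  | cons p ps ih =>
    intro gts G s hG hlen
    cases gts with
    | nil => simp at hlen
    | cons g gs =>
      have hsG : s < G.length := by
        have := congrArg List.length hG
        simp at this
        omega
      have hGs : G[s] = g := by
        have := congrArg (fun l => l[0]?) hG
        simp [List.getElem?_drop] at this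
        simpa [List.getElem?_eq_getElem hsG] using this
      have hG' : G.drop (s + 1) = gs := by
        have := congrArg (List.drop 1) hG
        simpa [List.drop_drop, Nat.add_comm] using this
      have hget : PySem.List.pyGetD G (s : Int) 0 = g := by
        rw [PySem.List.pyGetD_natCast]
        simp [List.getD, List.getElem?_eq_getElem hsG, hGs]
      have hrec := ih gs G (s + 1) hG' (by simp at hlen ⊢; omega)
      rw [PySem.List.enumerate_cons]
      by_cases he : p = c
      · simp only [List.filter_cons, List.zip_cons_cons, pvBucket, List.filterMap_cons]
        simp only [he, beq_self_eq_true, if_pos, List.map_cons]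
        have : ((s : Int) + 1) = ((s + 1 : Nat) : Int) := by push_cast; ring
        rw [this, hrec, hget]
        simp [pvBucket]
      · simp only [List.filter_cons, List.zip_cons_cons, pvBucket, List.filterMap_cons]
        have hb : (p == c) = false := by simp [he]
        simp only [hb, Bool.false_eq_true, he, if_false]
        have : ((s : Int) + 1) = ((s + 1 : Nat) : Int) := by push_cast; ring
        rw [this, hrec]
        simp [pvBucket]

-- A's outer fold as a map over the cluster range
theorem pvA_eq_map (preds : List Int) (n : Int) (gts : List Int) :
    rearange_clustering_data preds n gts
      = (PySem.List.pyRange 0 n 1).map (fun c =>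
          (((PySem.List.enumerate preds).filter (fun iv => iv.2 == c)).map (fun iv => iv.1)).foldl
            (fun ls index => ls ++ [PySem.List.pyGetD gts index 0]) []) := by
  unfold rearange_clustering_data
  rw [PySem.List.foldl_append_singleton_eq_map]
  simp

-- ===== VERDICT (by name: the statement is the Claim_ definition above) =====
theorem rearange_clustering_data_spec : Claim_equal_rearange_clustering_data := by
  intro preds n gts _ hpre
  unfold Spec_rearange_clustering_data
  have hlen : preds.length = gts.length := hpre
  apply List.ext_getElem?
  intro c
  rw [pvA_eq_map]
  by_cases hc : (c : Int) < n
  · have hcn : c < n.toNat := by omega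
    have hn : n = (n.toNat : Int) := by omega
    rw [hn, PySem.List.getElem?_map_pyRange_zero _ n.toNat c hcn, ← hn]
    unfold rearange_clustering_data_alt
    rw [pvB_getElem? n _ _ c hc]
    have hrep : (List.replicate n.toNat ([] : List Int))[c]? = some [] := by
      simp [hcn]
    rw [hrep]
    simp only [Option.map_some, List.nil_append, Option.some.injEq]
    rw [List.foldl_map, PySem.List.foldl_append_singleton_eq_map]
    simp only [List.nil_append]
    have := pvA_row (c : Int) preds gts gts 0 (by simp) (le_of_eq hlen)
    simpa using this
  · have h1 : (List.map (fun c =>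
        (((PySem.List.enumerate preds).filter (fun iv => iv.2 == c)).map (fun iv => iv.1)).foldl
          (fun ls index => ls ++ [PySem.List.pyGetD gts index 0]) []) (PySem.List.pyRange 0 n))[c]? = none := by
      apply List.getElem?_eq_none
      rw [List.length_map, PySem.List.length_pyRange_one]
      omega
    have h2 : (rearange_clustering_data_alt preds n gts)[c]? = none := by
      apply List.getElem?_eq_none
      unfold rearange_clustering_data_alt
      rw [pvB_length]
      rw [List.length_replicate]
      omega
    rw [h1, h2]
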